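-- pv_equiv track=rewrite | github.com/apokalix/tipe2025 | tablecarctgit.py | nbinvariant
-- ===== SOURCE A (Python) =====
-- N=10 #variable globale pour la table
--
-- def nbinvariant(drap,rep): #drap est une liste de drapeaux (set)
--     res=0
--     for d in drap:
--         test=True
--         for k in range (len(d)):
--             current=set()
--             for i in range(N):
--                 if i+1 in d[k]:
--                     current.add(rep[i])
--             if current!=d[k]:
--                 test=False
--         if test:
--             res+=1
--     return res
-- ===== SOURCE B (Python) =====
-- N = 10  # variable globale pour la table
--
-- def nbinvariant(drap, rep):
--     # A set s is fixed by v -> rep[v-1] iff (image subset of s) and (s subset of image).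
--     # B checks these two inclusions pointwise, never materialising the image set.
--     def fixed(s):
--         for w in s:
--             if 1 <= w <= N and rep[w - 1] not in s:
--                 return False            # image not contained in s
--             if not any(1 <= v <= N and rep[v - 1] == w for v in s):
--                 return False            # w not reached: s not contained in image
--         return True
--     res = 0
--     for d in drap:
--         if all(fixed(s) for s in d):
--             res += 1
--     return res
-- ===== Notes on version B (the rewrite author's own statement) =====
-- stated objective: alternative
-- what changed: B never builds an image set: it decides fixedness by two pointwise inclusions (each element's image is a member of s, and each element of s is reached by some element's image) using membership tests and any(), instead of A's construction of the image set by scanning all N indices followed by set equality.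
import Mathlib
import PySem

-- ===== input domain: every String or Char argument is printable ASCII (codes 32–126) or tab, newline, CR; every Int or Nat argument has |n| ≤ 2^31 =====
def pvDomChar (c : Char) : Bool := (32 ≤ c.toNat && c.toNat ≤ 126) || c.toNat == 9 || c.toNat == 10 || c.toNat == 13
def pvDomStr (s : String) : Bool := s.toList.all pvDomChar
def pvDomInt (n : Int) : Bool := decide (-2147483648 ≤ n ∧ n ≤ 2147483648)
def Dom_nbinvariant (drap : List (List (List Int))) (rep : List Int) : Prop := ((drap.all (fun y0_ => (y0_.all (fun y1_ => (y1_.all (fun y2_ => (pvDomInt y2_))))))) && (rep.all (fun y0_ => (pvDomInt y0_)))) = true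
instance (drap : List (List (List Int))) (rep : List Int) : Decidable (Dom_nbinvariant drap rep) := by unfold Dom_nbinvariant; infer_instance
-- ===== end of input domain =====

-- B decides each set's fixedness by two pointwise inclusions over the set's own elements,
-- never building the image set; objective: alternative (no speed claim).

-- ===== PORT A =====
def nbinvariant (drap : List (List (List Int))) (rep : List Int) : Int :=
  drap.foldl (fun res d =>
    let test := (List.range d.length).foldl (fun (test : Bool) (k : Nat) =>
      let dk := PySem.List.pyGetD d (k : Int) []
      let current : PySem.Set Int :=
        (List.range 10).foldl (fun cur (i : Nat) =>
          if ((i : Int) + 1) ∈ dk then PySem.Set.add cur (PySem.List.pyGetD rep (i : Int) 0)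
          else cur) PySem.Set.empty
      if PySem.Set.equal current dk = false then false else test) true
    if test then res + 1 else res) 0

-- ===== PORT B =====
-- B's helper fixed(s): the early-return for-loop over s is the conjunction over s
def altFixed (rep : List Int) (s : List Int) : Bool :=
  s.all (fun w =>
    ((!(decide (1 ≤ w) && decide (w ≤ 10))) || decide (PySem.List.pyGetD rep (w - 1) 0 ∈ s)) &&
    s.any (fun v => decide (1 ≤ v) && decide (v ≤ 10) && decide (PySem.List.pyGetD rep (v - 1) 0 = w)))

def nbinvariant_alt (drap : List (List (List Int))) (rep : List Int) : Int :=
  drap.foldl (fun res d => if d.all (altFixed rep) then res + 1 else res) 0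

-- ===== PRECONDITION & SPEC =====
-- Pre_ excludes exactly the inputs where Python A raises IndexError: some set element v with
-- 1 ≤ v ≤ 10 forces the access rep[v-1] with v-1 ≥ len(rep).
def Pre_nbinvariant (drap : List (List (List Int))) (rep : List Int) : Prop :=
  ∀ d ∈ drap, ∀ s ∈ d, ∀ v ∈ s, 1 ≤ v → v ≤ 10 → v ≤ (rep.length : Int)
instance (drap : List (List (List Int))) (rep : List Int) : Decidable (Pre_nbinvariant drap rep) := by
  unfold Pre_nbinvariant; infer_instance

def pvWitness_nbinvariant : List (List (List Int)) × List Int :=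
  ([[[1, 2], [3]], [[2]]], [1, 2, 3])

def Spec_nbinvariant (drap : List (List (List Int))) (rep : List Int) (out : Int) : Prop := out = nbinvariant_alt drap rep
instance (drap : List (List (List Int))) (rep : List Int) (out : Int) : Decidable (Spec_nbinvariant drap rep out) := by unfold Spec_nbinvariant; infer_instance

-- ===== CLAIM (what is proved, stated in full; the proofs are below) =====
def Claim_equal_nbinvariant : Prop := ∀ (drap : List (List (List Int))) (rep : List Int), Dom_nbinvariant drap rep → Pre_nbinvariant drap rep → Spec_nbinvariant drap rep (nbinvariant drap rep)

-- ===== LEMMAS AND PROOFS =====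

-- membership in A's guarded fold-add loop
lemma mem_foldl_if_add {α β : Type} [BEq α] [LawfulBEq α]
    (l : List β) (p : β → Prop) [DecidablePred p] (f : β → α) (c : PySem.Set α) (y : α) :
    y ∈ l.foldl (fun cur i => if p i then PySem.Set.add cur (f i) else cur) c ↔
      y ∈ c ∨ ∃ i ∈ l, p i ∧ y = f i := by
  induction l generalizing c with
  | nil => simp
  | cons a t ih =>
    rw [List.foldl_cons, ih]
    by_cases hp : p a
    · simp only [if_pos hp, PySem.Set.mem_add, List.mem_cons]
      constructor
      · rintro ((h | rfl) | ⟨i, hi, hpi, rfl⟩)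
        · exact Or.inl h
        · exact Or.inr ⟨a, Or.inl rfl, hp, rfl⟩
        · exact Or.inr ⟨i, Or.inr hi, hpi, rfl⟩
      · rintro (h | ⟨i, (rfl | hi), hpi, rfl⟩)
        · exact Or.inl (Or.inl h)
        · exact Or.inl (Or.inr rfl)
        · exact Or.inr ⟨i, hi, hpi, rfl⟩
    · simp only [if_neg hp, List.mem_cons]
      constructor
      · rintro (h | ⟨i, hi, hpi, rfl⟩)
        · exact Or.inl h
        · exact Or.inr ⟨i, Or.inr hi, hpi, rfl⟩
      · rintro (h | ⟨i, (rfl | hi), hpi, rfl⟩)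
        · exact Or.inl h
        · exact absurd hpi hp
        · exact Or.inr ⟨i, hi, hpi, rfl⟩

-- A's per-set image-and-compare check equals B's double-inclusion check
lemma set_check_eq (rep : List Int) (s : List Int) :
    PySem.Set.equal
      ((List.range 10).foldl (fun cur (i : Nat) =>
        if ((i : Int) + 1) ∈ s then PySem.Set.add cur (PySem.List.pyGetD rep (i : Int) 0)
        else cur) PySem.Set.empty) s
    = altFixed rep s := by
  have hmem : ∀ y : Int,
      (y ∈ (List.range 10).foldl (fun cur (i : Nat) =>
        if ((i : Int) + 1) ∈ s then PySem.Set.add cur (PySem.List.pyGetD rep (i : Int) 0)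
        else cur) PySem.Set.empty) ↔
      ∃ v ∈ s, 1 ≤ v ∧ v ≤ 10 ∧ y = PySem.List.pyGetD rep (v - 1) 0 := by
    intro y
    rw [mem_foldl_if_add]
    simp only [PySem.Set.empty, List.not_mem_nil, false_or, List.mem_range]
    constructor
    · rintro ⟨i, hi, hv, rfl⟩
      refine ⟨(i : Int) + 1, hv, by omega, by omega, by norm_num⟩
    · rintro ⟨v, hv, h1, h10, rfl⟩
      refine ⟨(v - 1).toNat, by omega, ?_, ?_⟩
      · have hc : (((v - 1).toNat : Int)) = v - 1 := by omega
        rw [hc]; simpa using hv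
      · congr 1
        omega
  rw [Bool.eq_iff_iff, PySem.Set.equal_iff]
  unfold altFixed
  simp only [List.all_eq_true, List.any_eq_true, Bool.and_eq_true, Bool.or_eq_true,
    Bool.not_eq_true', Bool.and_eq_false_iff, decide_eq_false_iff_not, decide_eq_true_eq,
    not_le]
  constructor
  · intro H w hw
    refine ⟨?_, ?_⟩
    · by_cases h1 : 1 ≤ w
      · by_cases h10 : w ≤ 10
        · exact Or.inr ((H _).mp ((hmem _).mpr ⟨w, hw, h1, h10, rfl⟩))
        · exact Or.inl (Or.inr (by omega))
      · exact Or.inl (Or.inl (by omega))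
    · obtain ⟨v, hv, h1, h10, he⟩ := (hmem w).mp ((H w).mpr hw)
      exact ⟨v, hv, ⟨h1, h10⟩, he.symm⟩
  · intro H x
    rw [hmem x]
    constructor
    · rintro ⟨v, hv, h1, h10, rfl⟩
      rcases (H v hv).1 with (h | h) | h
      · omega
      · omega
      · exact h
    · intro hx
      obtain ⟨-, v, hv, ⟨h1, h10⟩, he⟩ := H x hx
      exact ⟨v, hv, h1, h10, he.symm⟩

-- the sticky boolean loop is an 'all'
lemma foldl_sticky {β : Type} (l : List β) (p : β → Bool) (b : Bool) :
    l.foldl (fun t x => if p x = false then false else t) b = (b && l.all p) := by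
  induction l generalizing b with
  | nil => simp
  | cons a t ih =>
    rw [List.foldl_cons, ih]
    by_cases hp : p a = true
    · simp [hp]
    · simp only [Bool.not_eq_true] at hp
      simp [hp]

-- iterating d by index k = range(len d) with d[k] is 'all' over d
lemma range_all_eq_all {β : Type} (d : List β) (dflt : β) (q : β → Bool) :
    ((List.range d.length).all (fun k => q (PySem.List.pyGetD d (k : Int) dflt))) = d.all q := by
  rw [Bool.eq_iff_iff, List.all_eq_true, List.all_eq_true]
  constructor
  · intro h x hx
    obtain ⟨k, hk, rfl⟩ := List.mem_iff_getElem.mp hx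
    have hq := h _ (List.mem_range.mpr hk)
    rwa [PySem.List.pyGetD_natCast, List.getD_eq_getElem d dflt hk] at hq
  · intro h k hk
    rw [List.mem_range] at hk
    rw [PySem.List.pyGetD_natCast, List.getD_eq_getElem d dflt hk]
    exact h _ (List.getElem_mem hk)

-- A's whole per-flag loop equals B's per-flag 'all'
lemma flag_check_eq (rep : List Int) (d : List (List Int)) :
    (List.range d.length).foldl (fun (test : Bool) (k : Nat) =>
      if PySem.Set.equal
          ((List.range 10).foldl (fun cur (i : Nat) =>
            if ((i : Int) + 1) ∈ PySem.List.pyGetD d (k : Int) [] then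
              PySem.Set.add cur (PySem.List.pyGetD rep (i : Int) 0)
            else cur) PySem.Set.empty) (PySem.List.pyGetD d (k : Int) []) = false
      then false else test) true
    = d.all (altFixed rep) := by
  have hfun : (fun (test : Bool) (k : Nat) =>
      if PySem.Set.equal
          ((List.range 10).foldl (fun cur (i : Nat) =>
            if ((i : Int) + 1) ∈ PySem.List.pyGetD d (k : Int) [] then
              PySem.Set.add cur (PySem.List.pyGetD rep (i : Int) 0)
            else cur) PySem.Set.empty) (PySem.List.pyGetD d (k : Int) []) = false
      then false else test)
    = (fun (test : Bool) (k : Nat) =>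
      if (fun (k : Nat) => altFixed rep (PySem.List.pyGetD d (k : Int) [])) k = false
      then false else test) := by
    funext test k
    rw [set_check_eq]
  rw [hfun, foldl_sticky, Bool.true_and]
  exact range_all_eq_all d [] (altFixed rep)

-- ===== VERDICT (by name: the statement is the Claim_ definition above) =====
theorem nbinvariant_spec : Claim_equal_nbinvariant := by
  intro drap rep _ _
  unfold Spec_nbinvariant nbinvariant nbinvariant_alt
  have hfun : (fun (res : Int) (d : List (List Int)) =>
      let test := (List.range d.length).foldl (fun (test : Bool) (k : Nat) =>
        let dk := PySem.List.pyGetD d (k : Int) []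
        let current : PySem.Set Int :=
          (List.range 10).foldl (fun cur (i : Nat) =>
            if ((i : Int) + 1) ∈ dk then PySem.Set.add cur (PySem.List.pyGetD rep (i : Int) 0)
            else cur) PySem.Set.empty
        if PySem.Set.equal current dk = false then false else test) true
      if test then res + 1 else res)
    = (fun (res : Int) (d : List (List Int)) => if d.all (altFixed rep) then res + 1 else res) := by
    funext res d
    simp only []
    rw [flag_check_eq]
  rw [hfun]
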